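-- pv_equiv track=rewrite | github.com/Enjef/Algo | 1500 - 1599/1578 - Minimum Time to Make Rope Colorful/1578 - Minimum Time to Make Rope Colorful.py | minCost_3d_best_speed
-- ===== SOURCE A (Python) =====
-- from typing import List
--
-- def minCost_3d_best_speed(colors: str, neededTime: List[int]) -> int:
--     pval = 0
--     prev = 0
--     ln = len(colors)
--     for i in range(1, ln):
--         if colors[i] == colors[prev]:
--             if neededTime[i] > neededTime[prev]:
--                 pval += neededTime[prev]
--                 prev = i
--             else:
--                 pval += neededTime[i]
--         else:
--             prev = i
--     return pval
-- ===== SOURCE B (Python) =====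
-- def minCost_3d_best_speed(colors: str, neededTime: list) -> int:
--     # total time minus the max kept in each maximal run of equal colors
--     total = sum(neededTime[:len(colors)])
--     saved = 0
--     run_max = 0
--     prev_c = None
--     for c, t in zip(colors, neededTime):
--         if c == prev_c:
--             run_max = max(run_max, t)
--         else:
--             saved += run_max
--             run_max = t
--         prev_c = c
--     saved += run_max
--     return total - saved
-- ===== Notes on version B (the rewrite author's own statement) =====
-- stated objective: simpler
-- what changed: A tracks the index of the current run's maximum and accumulates the smaller of each compared pair; B computes the total of the needed times and subtracts the maximum of each maximal run of equal colors, found in one straightforward group scan with no index bookkeeping.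
import Mathlib
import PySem

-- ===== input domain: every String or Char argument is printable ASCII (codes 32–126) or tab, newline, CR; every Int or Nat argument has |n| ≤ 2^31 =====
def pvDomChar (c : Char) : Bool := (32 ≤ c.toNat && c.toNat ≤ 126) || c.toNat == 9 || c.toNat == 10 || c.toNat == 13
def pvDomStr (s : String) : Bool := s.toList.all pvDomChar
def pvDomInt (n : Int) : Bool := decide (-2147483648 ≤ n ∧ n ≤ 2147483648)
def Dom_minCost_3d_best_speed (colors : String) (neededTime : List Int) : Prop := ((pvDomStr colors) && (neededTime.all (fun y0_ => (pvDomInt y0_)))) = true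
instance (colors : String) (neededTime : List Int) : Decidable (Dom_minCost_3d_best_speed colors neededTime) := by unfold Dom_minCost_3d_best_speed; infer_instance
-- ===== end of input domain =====

-- B computes the total of the needed times and subtracts each maximal run's maximum in one
-- group scan, instead of A's index-of-current-maximum bookkeeping; same O(n) cost.

-- ===== PORT A =====
-- loop body of A's 'for i in range(1, ln)': state = (pval, prev)
def bodyA (cs : List Char) (nT : List Int) (st : Int × Int) (i : Int) : Int × Int :=
  if PySem.List.pyGetD cs i ' ' = PySem.List.pyGetD cs st.2 ' ' then
    if PySem.List.pyGetD nT i 0 > PySem.List.pyGetD nT st.2 0 then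
      (st.1 + PySem.List.pyGetD nT st.2 0, i)
    else
      (st.1 + PySem.List.pyGetD nT i 0, st.2)
  else (st.1, i)

def minCost_3d_best_speed (colors : String) (neededTime : List Int) : Int :=
  let cs := colors.toList
  let ln : Int := cs.length
  ((PySem.List.pyRange 1 ln 1).foldl (bodyA cs neededTime) (0, 0)).1

-- ===== PORT B =====
-- loop body of B's 'for c, t in zip(colors, neededTime)': state = (saved, run_max, prev_c)
def bodyB (st : Int × Int × Option Char) (ct : Char × Int) : Int × Int × Option Char :=
  if some ct.1 = st.2.2 then (st.1, max st.2.1 ct.2, some ct.1)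
  else (st.1 + st.2.1, ct.2, some ct.1)

def minCost_3d_best_speed_alt (colors : String) (neededTime : List Int) : Int :=
  let cs := colors.toList
  let total := (PySem.List.slice neededTime none (some (cs.length : Int))).sum
  let st := (cs.zip neededTime).foldl bodyB ((0 : Int), (0 : Int), (none : Option Char))
  total - (st.1 + st.2.1)

-- ===== PRECONDITION & SPEC =====
-- Pre_ holds exactly where A returns: A raises IndexError iff some adjacent equal pair of
-- colors sits at an index with no entry in neededTime; those inputs are excluded, unclaimed.
def Pre_minCost_3d_best_speed (colors : String) (neededTime : List Int) : Prop :=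
  ∀ i < colors.toList.length, 0 < i →
    colors.toList.getD i ' ' = colors.toList.getD (i - 1) ' ' → i < neededTime.length
instance (colors : String) (neededTime : List Int) : Decidable (Pre_minCost_3d_best_speed colors neededTime) := by unfold Pre_minCost_3d_best_speed; infer_instance
def pvWitness_minCost_3d_best_speed : String × List Int := ("aab", [1, 2, 3])

def Spec_minCost_3d_best_speed (colors : String) (neededTime : List Int) (out : Int) : Prop := out = minCost_3d_best_speed_alt colors neededTime
instance (colors : String) (neededTime : List Int) (out : Int) : Decidable (Spec_minCost_3d_best_speed colors neededTime out) := by unfold Spec_minCost_3d_best_speed; infer_instance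

-- ===== CLAIM (what is proved, stated in full; the proofs are below) =====
def Claim_equal_minCost_3d_best_speed : Prop := ∀ (colors : String) (neededTime : List Int), Dom_minCost_3d_best_speed colors neededTime → Pre_minCost_3d_best_speed colors neededTime → Spec_minCost_3d_best_speed colors neededTime (minCost_3d_best_speed colors neededTime)

-- ===== LEMMAS AND PROOFS =====

/-- The pair A's loop reads at index i (with Python-default values out of range). -/
def elA (cs : List Char) (nT : List Int) (i : Nat) : Char × Int :=
  (cs.getD i ' ', nT.getD i 0)

/-- Structural form of A's loop: state = (pval, char at prev, time at prev). -/
def loopA : List (Char × Int) → Int → Char → Int → Int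
  | [], pval, _, _ => pval
  | (c, t) :: rest, pval, pc, pt =>
    if c = pc then
      if t > pt then loopA rest (pval + pt) c t else loopA rest (pval + t) pc pt
    else loopA rest pval c t

/-- Structural form of B's loop (after the first element): returns final saved + run_max. -/
def loopB : List (Char × Int) → Int → Int → Char → Int
  | [], s, rm, _ => s + rm
  | (c, t) :: rest, s, rm, pc =>
    if c = pc then loopB rest s (max rm t) pc else loopB rest (s + rm) t c

/-- B's loop with the full final state exposed. -/
def stB : List (Char × Int) → Int → Int → Char → Int × Int × Char
  | [], s, rm, pc => (s, rm, pc)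
  | (c, t) :: rest, s, rm, pc =>
    if c = pc then stB rest s (max rm t) pc else stB rest (s + rm) t c

def sumT (l : List (Char × Int)) : Int := (l.map Prod.snd).sum

theorem sumT_append (l1 l2 : List (Char × Int)) : sumT (l1 ++ l2) = sumT l1 + sumT l2 := by
  simp [sumT]

theorem loopB_shift (l : List (Char × Int)) : ∀ (s s' rm : Int) (pc : Char),
    loopB l (s + s') rm pc = s + loopB l s' rm pc := by
  induction l with
  | nil => intro s s' rm pc; simp [loopB]; ring
  | cons ct rest ih =>
    intro s s' rm pc
    obtain ⟨c, t⟩ := ct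
    by_cases h : c = pc
    · simp [loopB, h, ih]
    · simp only [loopB, if_neg h]
      rw [add_assoc, ih]

theorem loopA_eq_loopB (l : List (Char × Int)) : ∀ (pval : Int) (pc : Char) (pt : Int),
    loopA l pval pc pt = pval + pt + sumT l - loopB l 0 pt pc := by
  induction l with
  | nil => intro pval pc pt; simp [loopA, loopB, sumT]
  | cons ct rest ih =>
    intro pval pc pt
    obtain ⟨c, t⟩ := ct
    by_cases h : c = pc
    · by_cases ht : t > pt
      · have hm : max pt t = t := by omega
        simp [loopA, loopB, h, ht, ih, sumT, hm]; ring
      · have hm : max pt t = pt := by omega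
        simp [loopA, loopB, h, ht, ih, sumT, hm]; ring
    · have hs : loopB rest pt t c = pt + loopB rest 0 t c := by
        simpa using loopB_shift rest pt 0 t c
      simp [loopA, loopB, h, ih, sumT]
      rw [hs]; ring

/-- B's fold with a concrete previous character agrees with loopB. -/
theorem foldB_eq (l : List (Char × Int)) : ∀ (s rm : Int) (pc : Char),
    (l.foldl bodyB (s, rm, some pc)).1 + (l.foldl bodyB (s, rm, some pc)).2.1
      = loopB l s rm pc := by
  induction l with
  | nil => intro s rm pc; simp [loopB]
  | cons ct rest ih =>
    intro s rm pc
    obtain ⟨c, t⟩ := ct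
    by_cases h : c = pc
    · simp [bodyB, h, loopB, ih]
    · have h' : ¬ (some c = some pc) := by simp [h]
      simp [bodyB, h', loopB, h, ih]

theorem loopB_eq_stB (l : List (Char × Int)) : ∀ (s rm : Int) (pc : Char),
    loopB l s rm pc = (stB l s rm pc).1 + (stB l s rm pc).2.1 := by
  induction l with
  | nil => intro s rm pc; simp [loopB, stB]
  | cons ct rest ih =>
    intro s rm pc
    obtain ⟨c, t⟩ := ct
    by_cases h : c = pc <;> simp [loopB, stB, h, ih]

theorem loopB_append (l1 : List (Char × Int)) : ∀ (l2 : List (Char × Int)) (s rm : Int) (pc : Char),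
    loopB (l1 ++ l2) s rm pc
      = loopB l2 (stB l1 s rm pc).1 (stB l1 s rm pc).2.1 (stB l1 s rm pc).2.2 := by
  induction l1 with
  | nil => intro l2 s rm pc; simp [stB]
  | cons ct rest ih =>
    intro l2 s rm pc
    obtain ⟨c, t⟩ := ct
    by_cases h : c = pc <;> simp [loopB, stB, h, ih]

theorem stB_pc (l : List (Char × Int)) : ∀ (s rm : Int) (pc : Char),
    (stB l s rm pc).2.2 = (l.map Prod.fst).getLastD pc := by
  induction l with
  | nil => intro s rm pc; simp [stB]
  | cons ct rest ih =>
    intro s rm pc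
    obtain ⟨c, t⟩ := ct
    by_cases h : c = pc
    · rw [show stB ((c, t) :: rest) s rm pc = stB rest s (max rm t) pc from by simp [stB, h]]
      rw [ih, List.map_cons, List.getLastD_cons, h]
    · rw [show stB ((c, t) :: rest) s rm pc = stB rest (s + rm) t c from by simp [stB, h]]
      rw [ih, List.map_cons, List.getLastD_cons]

/-- On a chain of pairwise-adjacent-distinct colors, B's loop flushes every time. -/
theorem loopB_chain (l : List (Char × Int)) : ∀ (s rm : Int) (pc : Char),
    List.IsChain (fun a b => a ≠ b) (pc :: l.map Prod.fst) →
    loopB l s rm pc = s + rm + sumT l := by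
  induction l with
  | nil => intro s rm pc _; simp [loopB, sumT]
  | cons ct rest ih =>
    intro s rm pc hch
    obtain ⟨c, t⟩ := ct
    rw [List.map_cons, List.isChain_cons_cons] at hch
    rw [loopB, if_neg (fun h => hch.1 h.symm), ih (s + rm) t c hch.2]
    simp [sumT]; ring

theorem chain_ne_range' (f : Nat → Char) : ∀ (cnt st : Nat), 0 < st →
    (∀ i, st ≤ i → i < st + cnt → f (i - 1) ≠ f i) →
    List.IsChain (fun a b => a ≠ b) (f (st - 1) :: (List.range' st cnt).map f) := by
  intro cnt
  induction cnt with
  | zero => intro st _ _; exact List.IsChain.singleton _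
  | succ n ih =>
    intro st hst h
    rw [List.range'_succ, List.map_cons, List.isChain_cons_cons]
    constructor
    · exact h st le_rfl (by omega)
    · have := ih (st + 1) (by omega) (fun i h1 h2 => h i (by omega) (by omega))
      simpa using this

theorem drop_map_range (f : Nat → Char × Int) (n k : Nat) :
    ((List.range n).map f).drop k = (List.range' k (n - k)).map f := by
  rw [List.range_eq_range', ← List.map_drop, List.drop_range']
  simp

/-- When neededTime covers a prefix, A's read pairs agree with the zip on that prefix. -/
theorem take_map_range_elA (cs : List Char) (nT : List Int) (h : nT.length ≤ cs.length) :
    (((List.range cs.length).map (elA cs nT)).take nT.length) = cs.zip nT := by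
  apply List.ext_getElem
  · simp; omega
  · intro i h1 h2
    simp only [List.getElem_take, List.getElem_map, List.getElem_range, List.getElem_zip]
    have h1' : i < nT.length ∧ i < cs.length := by simpa using h1
    simp [elA, List.getElem?_eq_getElem h1'.1, List.getElem?_eq_getElem h1'.2]

theorem map_range_elA_eq_zip (cs : List Char) (nT : List Int) (h : cs.length ≤ nT.length) :
    (List.range cs.length).map (elA cs nT) = cs.zip nT := by
  apply List.ext_getElem
  · simp; omega
  · intro i h1 h2
    simp only [List.getElem_map, List.getElem_range, List.getElem_zip]
    have hi : i < cs.length := by simpa using h1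
    simp [elA, List.getElem?_eq_getElem hi, List.getElem?_eq_getElem (lt_of_lt_of_le hi h)]

theorem sumT_out_of_range (cs : List Char) (nT : List Int) (m cnt : Nat) (h : nT.length ≤ m) :
    sumT ((List.range' m cnt).map (elA cs nT)) = 0 := by
  rw [sumT]
  apply List.sum_eq_zero
  intro x hx
  simp only [List.map_map, List.mem_map, List.mem_range'] at hx
  obtain ⟨i, hi, rfl⟩ := hx
  obtain ⟨j, hj, rfl⟩ := hi
  simp [elA, Function.comp, List.getElem?_eq_none (show nT.length ≤ m + j by omega)]

/-- A's indexed fold agrees with loopA over the read-pair list — unconditionally. -/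
theorem foldA_eq (n : Nat) : ∀ (cs : List Char) (nT : List Int)
    (k p : Nat) (pval : Int) (_hn : cs.length - k ≤ n) (_hpk : p < k),
    ((PySem.List.pyRange (k : Int) (cs.length : Int) 1).foldl (bodyA cs nT) (pval, (p : Int))).1
      = loopA (((List.range cs.length).map (elA cs nT)).drop k) pval (cs.getD p ' ') (nT.getD p 0) := by
  induction n with
  | zero =>
    intro cs nT k p pval hn _
    have hk : cs.length ≤ k := by omega
    rw [PySem.List.pyRange_one_eq_nil (by exact_mod_cast hk)]
    rw [List.drop_eq_nil_of_le (by simpa using hk)]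
    simp [loopA]
  | succ n ih =>
    intro cs nT k p pval hn hpk
    by_cases hk : k < cs.length
    · rw [PySem.List.pyRange_one_cons (by exact_mod_cast hk)]
      simp only [List.foldl_cons]
      have hdrop : (((List.range cs.length).map (elA cs nT)).drop k)
          = elA cs nT k :: (((List.range cs.length).map (elA cs nT)).drop (k + 1)) := by
        rw [List.drop_eq_getElem_cons (by simpa using hk)]
        simp
      have hbody : bodyA cs nT (pval, (p : Int)) (k : Int) =
          if cs.getD k ' ' = cs.getD p ' ' then
            if nT.getD k 0 > nT.getD p 0 then (pval + nT.getD p 0, (k : Int))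
            else (pval + nT.getD k 0, (p : Int))
          else (pval, (k : Int)) := by
        simp [bodyA]
      rw [hbody, hdrop]
      have hcast : (k : Int) + 1 = ((k + 1 : Nat) : Int) := by push_cast; ring
      by_cases hc : cs.getD k ' ' = cs.getD p ' '
      · by_cases ht : nT.getD k 0 > nT.getD p 0
        · rw [if_pos hc, if_pos ht, hcast,
            ih cs nT (k + 1) k (pval + nT.getD p 0) (by omega) (by omega)]
          simp only [loopA, elA]
          rw [if_pos hc, if_pos ht]
        · rw [if_pos hc, if_neg ht, hcast,
            ih cs nT (k + 1) p (pval + nT.getD k 0) (by omega) (by omega)]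
          simp only [loopA, elA]
          rw [if_pos hc, if_neg ht]
      · rw [if_neg hc, hcast, ih cs nT (k + 1) k pval (by omega) (by omega)]
        simp only [loopA, elA]
        rw [if_neg hc]
    · have hk' : cs.length ≤ k := by omega
      rw [PySem.List.pyRange_one_eq_nil (by exact_mod_cast hk')]
      rw [List.drop_eq_nil_of_le (by simpa using hk')]
      simp [loopA]

theorem map_snd_zip_all (cs : List Char) : ∀ (nT : List Int), nT.length ≤ cs.length →
    (cs.zip nT).map Prod.snd = nT := by
  induction cs with
  | nil => intro nT h; simp at h ⊢; omega
  | cons c cr ih =>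
    intro nT h
    cases nT with
    | nil => simp
    | cons t ntr => simp [ih ntr (by simpa using h)]

theorem map_snd_zip_take : ∀ (cs : List Char) (nT : List Int), cs.length ≤ nT.length →
    (cs.zip nT).map Prod.snd = nT.take cs.length := by
  intro cs
  induction cs with
  | nil => intro nT _; simp
  | cons c cr ih =>
    intro nT hlen
    cases nT with
    | nil => simp at hlen
    | cons t ntr => simp [ih ntr (by simpa using hlen)]

-- ===== VERDICT (by name: the statement is the Claim_ definition above) =====
theorem minCost_3d_best_speed_spec : Claim_equal_minCost_3d_best_speed := by
  intro colors neededTime _ hpre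
  unfold Spec_minCost_3d_best_speed
  unfold Pre_minCost_3d_best_speed at hpre
  cases hcs : colors.toList with
  | nil =>
    simp only [minCost_3d_best_speed, minCost_3d_best_speed_alt, hcs]
    simp [PySem.List.pyRange_one_eq_nil (by norm_num : (0 : Int) ≤ 1)]
    rw [PySem.List.slice_to neededTime (by norm_num : (0 : Int) ≤ 0)]
    simp
  | cons c0 cr =>
    rw [hcs] at hpre
    simp only [minCost_3d_best_speed, minCost_3d_best_speed_alt, hcs]
    have hA := foldA_eq ((c0 :: cr).length) (c0 :: cr) neededTime 1 0 0 (by omega) (by omega)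
    push_cast at hA
    rw [hA, loopA_eq_loopB]
    simp only [List.getD_cons_zero]
    cases neededTime with
    | nil =>
      -- no adjacent duplicates at all: A's loop never adds, B sees an empty zip
      have hfst : ((List.range' 1 ((c0 :: cr).length - 1)).map (elA (c0 :: cr) [])).map Prod.fst
          = (List.range' 1 ((c0 :: cr).length - 1)).map (fun i => (c0 :: cr).getD i ' ') := by
        simp [List.map_map, elA, Function.comp]
      have hch := chain_ne_range' (fun i => (c0 :: cr).getD i ' ') ((c0 :: cr).length - 1) 1
        (by omega) (fun i h1 h2 heq => absurd (hpre i (by omega) (by omega) heq.symm) (by simp))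
      rw [drop_map_range]
      rw [loopB_chain _ _ _ _ (by rw [hfst]; simpa using hch)]
      rw [PySem.List.slice_to [] (by positivity)]
      simp [sumT]
    | cons t0 ntr =>
      rw [PySem.List.slice_to_natCast]
      by_cases hlt : (c0 :: cr).length ≤ (t0 :: ntr).length
      · -- neededTime covers colors: the read pairs are exactly the zip
        rw [map_range_elA_eq_zip _ _ hlt]
        have hzip : (c0 :: cr).zip (t0 :: ntr) = (c0, t0) :: cr.zip ntr := by simp
        rw [hzip]
        simp only [List.drop_succ_cons, List.drop_zero, List.getD_cons_zero]
        rw [List.foldl_cons]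
        have hb0 : bodyB ((0 : Int), (0 : Int), (none : Option Char)) (c0, t0)
            = ((0 : Int), t0, some c0) := by simp [bodyB]
        rw [hb0, foldB_eq]
        have htake : (t0 :: ntr).take (c0 :: cr).length = t0 :: ntr.take cr.length := by simp
        rw [htake]
        have hsum : (ntr.take cr.length).sum = sumT (cr.zip ntr) := by
          rw [sumT, map_snd_zip_take cr ntr (by simpa using hlt)]
        simp only [List.sum_cons, hsum]
        ring
      · -- neededTime is a strict prefix: beyond it colors has no adjacent duplicates
        replace hlt := Nat.lt_of_not_le hlt
        have hm1 : 1 ≤ (t0 :: ntr).length := by simp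
        have hmlt : (t0 :: ntr).length < (c0 :: cr).length := hlt
        -- split the read pairs at (t0 :: ntr).length
        have hsplit : ((List.range (c0 :: cr).length).map (elA (c0 :: cr) (t0 :: ntr))).drop 1
            = ((c0 :: cr).zip (t0 :: ntr)).drop 1
              ++ (List.range' (t0 :: ntr).length ((c0 :: cr).length - (t0 :: ntr).length)).map
                  (elA (c0 :: cr) (t0 :: ntr)) := by
          conv_lhs => rw [← List.take_append_drop (t0 :: ntr).length
            ((List.range (c0 :: cr).length).map (elA (c0 :: cr) (t0 :: ntr)))]
          rw [drop_map_range]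
          rw [take_map_range_elA (c0 :: cr) (t0 :: ntr) (le_of_lt hmlt)]
          rw [List.drop_append_of_le_length (by simp)]
        rw [hsplit]
        have hzip : ((c0 :: cr).zip (t0 :: ntr)).drop 1 = cr.zip ntr := by simp
        rw [hzip]
        have hsumE : sumT ((List.range' (t0 :: ntr).length
            ((c0 :: cr).length - (t0 :: ntr).length)).map (elA (c0 :: cr) (t0 :: ntr))) = 0 :=
          sumT_out_of_range _ _ _ _ (by omega)
        -- the previous-char state after the zip part is the last covered color
        have hZfst : (cr.zip ntr).map Prod.fst = cr.take ntr.length := by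
          apply List.ext_getElem
          · simp only [List.length_map, List.length_zip, List.length_take]; omega
          · intro i h1 h2
            simp [List.getElem_zip]
        have hpc : (stB (cr.zip ntr) 0 ((t0 :: ntr).getD 0 0) c0).2.2
            = (c0 :: cr).getD ((t0 :: ntr).length - 1) ' ' := by
          rw [stB_pc, hZfst, List.getLastD_eq_getLast?, List.getLast?_eq_getElem?]
          cases ntr with
          | nil => simp
          | cons u us =>
            have hlt' : us.length + 1 < cr.length := by simpa using hmlt
            simp only [List.length_take, List.length_cons]
            have hidx : min (us.length + 1) cr.length - 1 = us.length := by omega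
            rw [hidx]
            have h2 : us.length < (List.take (us.length + 1) cr).length := by
              simp only [List.length_take]; omega
            rw [List.getElem?_eq_getElem h2]
            simp only [List.getElem_take, Option.getD_some]
            have h3 : us.length < cr.length := by omega
            simp [List.getElem?_eq_getElem h3]
        -- the tail beyond neededTime flushes without adding anything
        have hchE : List.IsChain (fun a b => a ≠ b)
            ((fun i => (c0 :: cr).getD i ' ') ((t0 :: ntr).length - 1)
              :: (List.range' (t0 :: ntr).length ((c0 :: cr).length - (t0 :: ntr).length)).map
                (fun i => (c0 :: cr).getD i ' ')) := by
          exact chain_ne_range' (fun i => (c0 :: cr).getD i ' ')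
            ((c0 :: cr).length - (t0 :: ntr).length) (t0 :: ntr).length (by omega)
            (fun i hi1 hi2 heq => absurd (hpre i (by omega) (by omega) heq.symm) (by omega))
        rw [loopB_append]
        rw [hpc]
        rw [loopB_chain _ _ _ _ (by
          have hfst2 : ((List.range' (t0 :: ntr).length
              ((c0 :: cr).length - (t0 :: ntr).length)).map (elA (c0 :: cr) (t0 :: ntr))).map
                Prod.fst
              = (List.range' (t0 :: ntr).length ((c0 :: cr).length - (t0 :: ntr).length)).map
                (fun i => (c0 :: cr).getD i ' ') := by
            simp [List.map_map, elA, Function.comp]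
          rw [hfst2]
          exact hchE)]
        rw [hsumE, ← loopB_eq_stB]
        -- B side
        have hzip2 : (c0 :: cr).zip (t0 :: ntr) = (c0, t0) :: cr.zip ntr := by simp
        rw [hzip2, List.foldl_cons]
        have hb0 : bodyB ((0 : Int), (0 : Int), (none : Option Char)) (c0, t0)
            = ((0 : Int), t0, some c0) := by simp [bodyB]
        rw [hb0, foldB_eq]
        have htake2 : (t0 :: ntr).take (c0 :: cr).length = t0 :: ntr := by
          apply List.take_of_length_le
          simp only [List.length_cons] at hmlt ⊢
          omega
        rw [htake2, sumT_append, hsumE]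
        have hsumZ : sumT (cr.zip ntr) = ntr.sum := by
          rw [sumT, map_snd_zip_all cr ntr (by simp only [List.length_cons] at hmlt; omega)]
        rw [hsumZ]
        simp only [List.sum_cons, List.getD_cons_zero]
        ring
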